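-- pv_equiv track=rewrite | github.com/mustafamyildiz33/egeese-edgemapping | paper_eval_runner.py | _fire_spread_batches
-- ===== SOURCE A (Python) =====
-- import math
--
-- def _auto_grid_size(number_of_nodes):
--     root = int(math.isqrt(int(number_of_nodes)))
--     if root > 0 and root * root == int(number_of_nodes):
--         return int(root)
--     root = int(math.ceil(math.sqrt(float(number_of_nodes))))
--     if root < 2:
--         root = 2
--     return int(root)
--
-- def _port_to_rc(base_port, port, grid):
--     idx = int(port) - int(base_port)
--     return int(idx // grid), int(idx % grid)
--
-- def _rc_to_port(base_port, row, col, grid, number_of_nodes):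
--     if row < 0 or col < 0 or row >= grid or col >= grid:
--         return None
--     idx = row * grid + col
--     if idx < 0 or idx >= int(number_of_nodes):
--         return None
--     return int(base_port) + idx
--
-- def _hex_neighbors_odd_r(col, row, grid):
--     if row % 2 == 0:
--         candidates = [
--             (col - 1, row),
--             (col + 1, row),
--             (col, row - 1),
--             (col - 1, row - 1),
--             (col, row + 1),
--             (col - 1, row + 1),
--         ]
--     else:
--         candidates = [
--             (col - 1, row),
--             (col + 1, row),
--             (col + 1, row - 1),
--             (col, row - 1),
--             (col + 1, row + 1),
--             (col, row + 1),
--         ]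
--     out = []
--     for c, r in candidates:
--         if 0 <= c < grid and 0 <= r < grid:
--             out.append((c, r))
--     return out
--
-- def _center_port(base_port, number_of_nodes):
--     grid = _auto_grid_size(number_of_nodes)
--     row = int(grid // 2)
--     col = int(grid // 2)
--     center = _rc_to_port(base_port, row, col, grid, number_of_nodes)
--     if center is None:
--         center = int(base_port) + max(0, (int(number_of_nodes) // 2))
--     return int(center)
--
-- def _neighbors_for_port(base_port, number_of_nodes, port):
--     grid = _auto_grid_size(number_of_nodes)
--     row, col = _port_to_rc(base_port, port, grid)
--     neighbors = []
--     for ncol, nrow in _hex_neighbors_odd_r(col, row, grid):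
--         nport = _rc_to_port(base_port, nrow, ncol, grid, number_of_nodes)
--         if nport is not None and int(nport) != int(port):
--             neighbors.append(int(nport))
--     return sorted(neighbors)
--
-- def _fire_ignition_port(base_port, number_of_nodes):
--     return _center_port(base_port, number_of_nodes)
--
-- def _fire_spread_batches(base_port, number_of_nodes):
--     ignition = _fire_ignition_port(base_port, number_of_nodes)
--     visited = {int(ignition)}
--     frontier = [int(ignition)]
--     layers = []
--
--     while frontier:
--         layers.append(sorted(int(port) for port in frontier))
--         next_frontier = []
--         for port in frontier:
--             for neighbor in _neighbors_for_port(base_port, number_of_nodes, port):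
--                 if int(neighbor) in visited:
--                     continue
--                 visited.add(int(neighbor))
--                 next_frontier.append(int(neighbor))
--         frontier = sorted(set(next_frontier))
--
--     return layers
-- ===== SOURCE B (Python) =====
-- import math
--
-- def _grid(number_of_nodes):
--     n = int(number_of_nodes)
--     r = math.isqrt(n)
--     if r > 0 and r * r == n:
--         return r
--     return max(2, r + 1)
--
-- def _ignition(base, n):
--     g = _grid(n)
--     idx = (g // 2) * (g + 1)
--     if idx < n:
--         return base + idx
--     return base + n // 2
--
-- def _nbr_ports(base, n, port):
--     g = _grid(n)
--     idx = port - base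
--     row, col = divmod(idx, g)
--     shift = row % 2
--     cand = [(row, col - 1), (row, col + 1)]
--     for dr in (-1, 1):
--         for dc in (shift - 1, shift):
--             cand.append((row + dr, col + dc))
--     return sorted(base + r * g + c
--                   for r, c in cand
--                   if 0 <= r < g and 0 <= c < g and r * g + c < n
--                   and base + r * g + c != port)
--
-- def _fire_spread_batches(base_port, number_of_nodes):
--     base = int(base_port)
--     n = int(number_of_nodes)
--     ignition = _ignition(base, n)
--     dist = {ignition: 0}
--     queue = [ignition]
--     i = 0
--     while i < len(queue):
--         cur = queue[i]
--         i += 1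
--         for nb in _nbr_ports(base, n, cur):
--             if nb not in dist:
--                 dist[nb] = dist[cur] + 1
--                 queue.append(nb)
--     maxd = max(dist.values())
--     return [sorted(p for p, d in dist.items() if d == layer)
--             for layer in range(maxd + 1)]
-- ===== Notes on version B (the rewrite author's own statement) =====
-- stated objective: alternative
-- what changed: Replaced A's synchronous frontier-expansion over helper-mediated (row,col) hex geometry by a single-queue BFS recording a port->distance dict in one flat traversal, with its own compact helpers (closed-form grid size via isqrt, ignition index arithmetic, index-space neighbour generation with one combined bounds filter), followed by a per-layer filter-and-sort grouping pass.
import Mathlib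
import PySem

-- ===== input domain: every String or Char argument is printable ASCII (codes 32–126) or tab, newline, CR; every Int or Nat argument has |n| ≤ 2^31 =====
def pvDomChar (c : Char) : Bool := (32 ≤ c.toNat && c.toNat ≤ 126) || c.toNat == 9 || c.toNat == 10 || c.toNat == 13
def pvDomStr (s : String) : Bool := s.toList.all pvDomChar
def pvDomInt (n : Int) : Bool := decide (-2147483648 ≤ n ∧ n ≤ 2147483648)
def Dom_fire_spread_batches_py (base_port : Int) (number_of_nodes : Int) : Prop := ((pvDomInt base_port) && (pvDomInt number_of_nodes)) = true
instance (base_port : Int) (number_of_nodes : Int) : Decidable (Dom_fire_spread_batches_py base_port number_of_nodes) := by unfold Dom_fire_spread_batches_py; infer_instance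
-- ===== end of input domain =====

-- B replaces A's synchronous frontier expansion over helper-mediated (row,col) geometry by a
-- single-queue BFS with its own compact helpers (closed-form grid size, arithmetic ignition index,
-- index-space neighbour generation with one combined filter) followed by a per-layer
-- filter-and-sort grouping pass (alternative decomposition, same result).
-- ===== PORT A =====
-- _auto_grid_size: 'math.ceil(math.sqrt(float(n)))' is ported as Nat.sqrt+1 for n ≠ 0 (and 0 for n = 0);
-- exact for 0 ≤ n ≤ 2^31 since double sqrt is correctly rounded there and is never an integer for non-squares.
def autoGridSize (number_of_nodes : Int) : Int :=
  let root : Int := (Nat.sqrt number_of_nodes.toNat : Int)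
  if 0 < root ∧ root * root = number_of_nodes then root
  else
    let root2 : Int := if number_of_nodes = 0 then 0 else (Nat.sqrt number_of_nodes.toNat : Int) + 1
    if root2 < 2 then 2 else root2

def portToRc (base_port port grid : Int) : Int × Int :=
  let idx := port - base_port
  (PySem.Int.floordiv idx grid, PySem.Int.mod idx grid)

def rcToPort (base_port row col grid number_of_nodes : Int) : Option Int :=
  if row < 0 ∨ col < 0 ∨ grid ≤ row ∨ grid ≤ col then none
  else
    let idx := row * grid + col
    if idx < 0 ∨ number_of_nodes ≤ idx then none
    else some (base_port + idx)

def hexNeighborsOddR (col row grid : Int) : List (Int × Int) :=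
  let candidates : List (Int × Int) :=
    if PySem.Int.mod row 2 = 0 then
      [(col - 1, row), (col + 1, row), (col, row - 1), (col - 1, row - 1), (col, row + 1), (col - 1, row + 1)]
    else
      [(col - 1, row), (col + 1, row), (col + 1, row - 1), (col, row - 1), (col + 1, row + 1), (col, row + 1)]
  candidates.foldl (fun out cr =>
    if 0 ≤ cr.1 ∧ cr.1 < grid ∧ 0 ≤ cr.2 ∧ cr.2 < grid then out ++ [cr] else out) []

def centerPort (base_port number_of_nodes : Int) : Int :=
  let grid := autoGridSize number_of_nodes
  let row := PySem.Int.floordiv grid 2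
  let col := PySem.Int.floordiv grid 2
  match rcToPort base_port row col grid number_of_nodes with
  | some c => c
  | none => base_port + max 0 (PySem.Int.floordiv number_of_nodes 2)

def neighborsForPort (base_port number_of_nodes port : Int) : List Int :=
  let grid := autoGridSize number_of_nodes
  let rc := portToRc base_port port grid
  let neighbors := (hexNeighborsOddR rc.2 rc.1 grid).foldl (fun acc p =>
    match rcToPort base_port p.2 p.1 grid number_of_nodes with
    | some nport => if nport ≠ port then acc ++ [nport] else acc
    | none => acc) []
  PySem.List.sorted neighbors (fun x => x) false

-- A's while-loop; fuel n.toNat+2 is enough (proved below), the 0 case is never reached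
def fireLoopA (base_port number_of_nodes : Int) : Nat → PySem.Set Int → List Int → List (List Int)
  | 0, _, _ => []
  | fuel + 1, visited, frontier =>
    if frontier = [] then []
    else
      let layer := PySem.List.sorted frontier (fun x => x) false
      let st := frontier.foldl (fun (s : PySem.Set Int × List Int) port =>
        (neighborsForPort base_port number_of_nodes port).foldl (fun s nb =>
          if nb ∈ s.1 then s else (PySem.Set.add s.1 nb, s.2 ++ [nb])) s) (visited, [])
      layer :: fireLoopA base_port number_of_nodes fuel st.1
        (PySem.List.sorted (PySem.Set.ofList st.2) (fun x => x) false)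

def fire_spread_batches_py (base_port : Int) (number_of_nodes : Int) : List (List Int) :=
  let ignition := centerPort base_port number_of_nodes
  fireLoopA base_port number_of_nodes (number_of_nodes.toNat + 2)
    (PySem.Set.add PySem.Set.empty ignition) [ignition]

-- ===== PORT B =====
-- _grid: math.isqrt(n) then r, or max(2, r+1); exact for 0 ≤ n (Pre_)
def gridAlt (number_of_nodes : Int) : Int :=
  let r : Int := (Nat.sqrt number_of_nodes.toNat : Int)
  if 0 < r ∧ r * r = number_of_nodes then r else max 2 (r + 1)

def ignitionAlt (base n : Int) : Int :=
  let g := gridAlt n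
  let idx := PySem.Int.floordiv g 2 * (g + 1)
  if idx < n then base + idx else base + PySem.Int.floordiv n 2

-- divmod(idx, g) with g ≥ 1 always (gridAlt never returns less than 1), so floordiv/mod are exact
def nbrPortsAlt (base n port : Int) : List Int :=
  let g := gridAlt n
  let idx := port - base
  let row := PySem.Int.floordiv idx g
  let col := PySem.Int.mod idx g
  let shift := PySem.Int.mod row 2
  let cand : List (Int × Int) :=
    [(row, col - 1), (row, col + 1)] ++
      ([(-1 : Int), 1].flatMap (fun dr => [shift - 1, shift].map (fun dc => (row + dr, col + dc))))
  PySem.List.sorted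
    ((cand.filter (fun rc =>
        decide (0 ≤ rc.1 ∧ rc.1 < g ∧ 0 ≤ rc.2 ∧ rc.2 < g ∧ rc.1 * g + rc.2 < n ∧
          base + rc.1 * g + rc.2 ≠ port))).map (fun rc => base + rc.1 * g + rc.2))
    (fun x => x) false

-- B's queue loop: the index-advancing queue (cur = queue[i]; i += 1; append fresh neighbours)
-- is ported as structural recursion on the unprocessed suffix queue[i:], one fuel unit per
-- processed node; fuel n.toNat+2 is enough
def fireLoopB (base_port number_of_nodes : Int) : Nat → PySem.Dict Int Int → List Int → PySem.Dict Int Int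
  | 0, dist, _ => dist
  | _ + 1, dist, [] => dist
  | fuel + 1, dist, current :: rest =>
    let st := (nbrPortsAlt base_port number_of_nodes current).foldl
      (fun (s : PySem.Dict Int Int × List Int) nb =>
        if s.1.contains nb then s
        else (s.1.insert nb (s.1.getD current 0 + 1), s.2 ++ [nb])) (dist, rest)
    fireLoopB base_port number_of_nodes fuel st.1 st.2

def fire_spread_batches_py_alt (base_port : Int) (number_of_nodes : Int) : List (List Int) :=
  let ignition := ignitionAlt base_port number_of_nodes
  let dist := fireLoopB base_port number_of_nodes (number_of_nodes.toNat + 2)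
    (PySem.Dict.insert PySem.Dict.empty ignition 0) [ignition]
  let maxd := (PySem.List.max? dist.values (fun v => v)).getD 0
  (PySem.List.pyRange 0 (maxd + 1) 1).map (fun layer =>
    PySem.List.sorted ((dist.items.filter (fun p => p.2 == layer)).map (·.1)) (fun x => x) false)

-- ===== PRECONDITION & SPEC =====
-- Pre_ excludes number_of_nodes < 0, where Python A raises ValueError (math.isqrt of a negative).
def Pre_fire_spread_batches_py (base_port : Int) (number_of_nodes : Int) : Prop := 0 ≤ number_of_nodes
instance (base_port : Int) (number_of_nodes : Int) : Decidable (Pre_fire_spread_batches_py base_port number_of_nodes) := by unfold Pre_fire_spread_batches_py; infer_instance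
def pvWitness_fire_spread_batches_py : Int × Int := (0, 9)

def Spec_fire_spread_batches_py (base_port : Int) (number_of_nodes : Int) (out : List (List Int)) : Prop := out = fire_spread_batches_py_alt base_port number_of_nodes
instance (base_port : Int) (number_of_nodes : Int) (out : List (List Int)) : Decidable (Spec_fire_spread_batches_py base_port number_of_nodes out) := by unfold Spec_fire_spread_batches_py; infer_instance

-- ===== CLAIM (what is proved, stated in full; the proofs are below) =====
def Claim_equal_fire_spread_batches_py : Prop := ∀ (base_port : Int) (number_of_nodes : Int), Dom_fire_spread_batches_py base_port number_of_nodes → Pre_fire_spread_batches_py base_port number_of_nodes → Spec_fire_spread_batches_py base_port number_of_nodes (fire_spread_batches_py base_port number_of_nodes)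

-- ===== LEMMAS AND PROOFS =====

-- ---- helper-equivalence: B's compact helpers compute A's helper values ----

lemma autoGridSize_pos (n : Int) : 1 ≤ autoGridSize n := by
  show 1 ≤ if 0 < ((Nat.sqrt n.toNat : Nat) : Int) ∧
      ((Nat.sqrt n.toNat : Nat) : Int) * ((Nat.sqrt n.toNat : Nat) : Int) = n
    then ((Nat.sqrt n.toNat : Nat) : Int)
    else (if (if n = 0 then (0 : Int) else ((Nat.sqrt n.toNat : Nat) : Int) + 1) < 2 then 2
      else (if n = 0 then (0 : Int) else ((Nat.sqrt n.toNat : Nat) : Int) + 1))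
  by_cases h1 : 0 < ((Nat.sqrt n.toNat : Nat) : Int) ∧
      ((Nat.sqrt n.toNat : Nat) : Int) * ((Nat.sqrt n.toNat : Nat) : Int) = n
  · rw [if_pos h1]
    linarith [h1.1]
  · rw [if_neg h1]
    split_ifs <;> omega

lemma gridAlt_eq (n : Int) (hn : 0 ≤ n) : gridAlt n = autoGridSize n := by
  unfold gridAlt autoGridSize
  by_cases h1 : 0 < ((Nat.sqrt n.toNat : Nat) : Int) ∧ ((Nat.sqrt n.toNat : Nat) : Int) * ((Nat.sqrt n.toNat : Nat) : Int) = n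
  · simp only [if_pos h1]
  · simp only [if_neg h1]
    by_cases hn0 : n = 0
    · subst hn0
      norm_num
    · have hpos : 0 < n.toNat := by omega
      have hs : 0 < Nat.sqrt n.toNat := Nat.sqrt_pos.2 hpos
      have hs' : (1 : Int) ≤ (Nat.sqrt n.toNat : Int) := by exact_mod_cast hs
      rw [if_neg hn0, if_neg (by omega : ¬ ((Nat.sqrt n.toNat : Int) + 1 < 2))]
      rw [max_eq_right (by omega : (2:Int) ≤ (Nat.sqrt n.toNat : Int) + 1)]

lemma rcToPort_eq (base r c g n : Int) :
    rcToPort base r c g n =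
      if 0 ≤ r ∧ r < g ∧ 0 ≤ c ∧ c < g ∧ 0 ≤ r * g + c ∧ r * g + c < n then
        some (base + (r * g + c))
      else none := by
  unfold rcToPort
  generalize r * g + c = t
  by_cases hc : 0 ≤ r ∧ r < g ∧ 0 ≤ c ∧ c < g ∧ 0 ≤ t ∧ t < n
  · rw [if_pos hc, if_neg (by omega : ¬ (r < 0 ∨ c < 0 ∨ g ≤ r ∨ g ≤ c)),
      if_neg (by omega : ¬ (t < 0 ∨ n ≤ t))]
  · rw [if_neg hc]
    by_cases h1 : r < 0 ∨ c < 0 ∨ g ≤ r ∨ g ≤ c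
    · rw [if_pos h1]
    · rw [if_neg h1, if_pos (by omega : t < 0 ∨ n ≤ t)]

lemma ignitionAlt_eq (base n : Int) (hn : 0 ≤ n) : ignitionAlt base n = centerPort base n := by
  have hg : 1 ≤ autoGridSize n := autoGridSize_pos n
  unfold ignitionAlt centerPort
  rw [gridAlt_eq n hn]
  show (if PySem.Int.floordiv (autoGridSize n) 2 * (autoGridSize n + 1) < n then
      base + PySem.Int.floordiv (autoGridSize n) 2 * (autoGridSize n + 1)
    else base + PySem.Int.floordiv n 2) =
    match rcToPort base (PySem.Int.floordiv (autoGridSize n) 2) (PySem.Int.floordiv (autoGridSize n) 2)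
        (autoGridSize n) n with
    | some c => c
    | none => base + max 0 (PySem.Int.floordiv n 2)
  rw [rcToPort_eq]
  simp only [PySem.Int.floordiv_eq_ediv_of_pos (by omega : (0:Int) < 2)]
  set g := autoGridSize n with hgdef
  have h0 : 0 ≤ g / 2 := by omega
  have h1 : g / 2 < g := by omega
  have hmul : 0 ≤ g / 2 * g := mul_nonneg h0 (by omega)
  have hidx : g / 2 * (g + 1) = g / 2 * g + g / 2 := by ring
  have hn2 : 0 ≤ n / 2 := by omega
  rw [hidx]
  by_cases hlt : g / 2 * g + g / 2 < n
  · rw [if_pos hlt, if_pos ⟨h0, h1, h0, h1, by linarith, hlt⟩]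
  · rw [if_neg hlt, if_neg (fun h => hlt h.2.2.2.2.2), max_eq_right hn2]

lemma flatMap_if_singleton {α β : Type} (P : α → Prop) [DecidablePred P] (f : α → β) :
    ∀ (L : List α),
      L.flatMap (fun x => if P x then [f x] else []) = (L.filter (fun x => decide (P x))).map f := by
  intro L
  induction L with
  | nil => rfl
  | cons a L ih => by_cases h : P a <;> simp [h, ih]

-- column uniqueness of idx = r*g + c
lemma rc_inj (g r1 c1 r2 c2 : Int) (hg : 0 < g) (hc1 : 0 ≤ c1) (hc1' : c1 < g)
    (hc2 : 0 ≤ c2) (hc2' : c2 < g) (heq : r1 * g + c1 = r2 * g + c2) :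
    r1 = r2 ∧ c1 = c2 := by
  rcases lt_trichotomy r1 r2 with h | h | h
  · exfalso
    have h' := mul_le_mul_of_nonneg_right (by omega : r1 + 1 ≤ r2) (by omega : (0:Int) ≤ g)
    rw [add_mul, one_mul] at h'
    linarith
  · refine ⟨h, ?_⟩
    have : r1 * g = r2 * g := by rw [h]
    linarith
  · exfalso
    have h' := mul_le_mul_of_nonneg_right (by omega : r2 + 1 ≤ r1) (by omega : (0:Int) ≤ g)
    rw [add_mul, one_mul] at h'
    linarith

-- generic core: B's single-filter index-space neighbour list equals A's hex-candidate pipeline,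
-- whenever the candidate lists agree up to coordinate swap
lemma nbr_core (base n port g : Int) (hg : 1 ≤ g)
    (L M : List (Int × Int)) (hndL : L.Nodup) (hndM : M.Nodup)
    (hmm : ∀ r c : Int, (r, c) ∈ M ↔ (c, r) ∈ L) :
    PySem.List.sorted
      ((M.filter (fun rc =>
          decide (0 ≤ rc.1 ∧ rc.1 < g ∧ 0 ≤ rc.2 ∧ rc.2 < g ∧ rc.1 * g + rc.2 < n ∧
            base + rc.1 * g + rc.2 ≠ port))).map (fun rc => base + rc.1 * g + rc.2))
      (fun x => x) false =
    PySem.List.sorted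
      ((L.foldl (fun out cr =>
          if 0 ≤ cr.1 ∧ cr.1 < g ∧ 0 ≤ cr.2 ∧ cr.2 < g then out ++ [cr] else out) []).foldl
        (fun acc p =>
          match rcToPort base p.2 p.1 g n with
          | some nport => if nport ≠ port then acc ++ [nport] else acc
          | none => acc) [])
      (fun x => x) false := by
  classical
  rw [PySem.List.foldl_append_ite_eq_filter]
  rw [List.nil_append]
  have hfun : (fun (acc : List Int) (p : Int × Int) =>
      match rcToPort base p.2 p.1 g n with
      | some nport => if nport ≠ port then acc ++ [nport] else acc
      | none => acc) =
      (fun acc p => acc ++ (if (0 ≤ p.2 ∧ p.2 < g ∧ 0 ≤ p.1 ∧ p.1 < g ∧ 0 ≤ p.2 * g + p.1 ∧ p.2 * g + p.1 < n)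
          ∧ base + (p.2 * g + p.1) ≠ port then [base + (p.2 * g + p.1)] else [])) := by
    funext acc p
    rw [rcToPort_eq]
    by_cases h1 : 0 ≤ p.2 ∧ p.2 < g ∧ 0 ≤ p.1 ∧ p.1 < g ∧ 0 ≤ p.2 * g + p.1 ∧ p.2 * g + p.1 < n
    · rw [if_pos h1]
      by_cases h2 : base + (p.2 * g + p.1) ≠ port
      · rw [if_pos (And.intro h1 h2)]
        simp [h2]
      · rw [if_neg (by tauto)]
        simp [h2]
    · rw [if_neg h1, if_neg (by tauto)]
      simp
  rw [hfun, PySem.List.foldl_append_eq_flatMap, List.nil_append, flatMap_if_singleton]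
  -- both sides are sorted images of candidate filters; compare as sorted nodup lists
  set bM : Int × Int → Bool := fun rc =>
    decide (0 ≤ rc.1 ∧ rc.1 < g ∧ 0 ≤ rc.2 ∧ rc.2 < g ∧ rc.1 * g + rc.2 < n ∧
      base + rc.1 * g + rc.2 ≠ port) with hbM
  set rawB := (M.filter bM).map (fun rc => base + rc.1 * g + rc.2) with hrawB
  set rawA := ((L.filter (fun x => decide (0 ≤ x.1 ∧ x.1 < g ∧ 0 ≤ x.2 ∧ x.2 < g))).filter
      (fun x => decide ((0 ≤ x.2 ∧ x.2 < g ∧ 0 ≤ x.1 ∧ x.1 < g ∧ 0 ≤ x.2 * g + x.1 ∧ x.2 * g + x.1 < n)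
        ∧ base + (x.2 * g + x.1) ≠ port))).map (fun p => base + (p.2 * g + p.1)) with hrawA
  have hndFA : ((L.filter (fun x => decide (0 ≤ x.1 ∧ x.1 < g ∧ 0 ≤ x.2 ∧ x.2 < g))).filter
      (fun x => decide ((0 ≤ x.2 ∧ x.2 < g ∧ 0 ≤ x.1 ∧ x.1 < g ∧ 0 ≤ x.2 * g + x.1 ∧ x.2 * g + x.1 < n)
        ∧ base + (x.2 * g + x.1) ≠ port))).Nodup :=
    ((hndL.filter _).filter _)
  have hndFB : (M.filter bM).Nodup := hndM.filter _
  have hndA : rawA.Nodup := by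
    rw [hrawA]
    refine List.Nodup.map_on ?_ hndFA
    intro x hx y hy hxy
    rw [List.mem_filter] at hx hy
    have hxc := of_decide_eq_true hx.2
    have hyc := of_decide_eq_true hy.2
    have := rc_inj g x.2 x.1 y.2 y.1 (by omega) hxc.1.2.2.1 hxc.1.2.2.2.1 hyc.1.2.2.1 hyc.1.2.2.2.1 (by omega)
    exact Prod.ext this.2 this.1
  have hndB : rawB.Nodup := by
    rw [hrawB]
    refine List.Nodup.map_on ?_ hndFB
    intro x hx y hy hxy
    rw [List.mem_filter, hbM] at hx hy
    have hxc := of_decide_eq_true hx.2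
    have hyc := of_decide_eq_true hy.2
    have := rc_inj g x.1 x.2 y.1 y.2 (by omega) hxc.2.2.1 hxc.2.2.2.1 hyc.2.2.1 hyc.2.2.2.1 (by omega)
    exact Prod.ext this.1 this.2
  have hmemx : ∀ x, x ∈ rawA ↔ x ∈ rawB := by
    intro x
    rw [hrawA, hrawB]
    simp only [List.mem_map, List.mem_filter, hbM, decide_eq_true_eq]
    constructor
    · rintro ⟨p, ⟨⟨hpL, _⟩, hc⟩, rfl⟩
      refine ⟨(p.2, p.1), ⟨?_, ?_⟩, by ring⟩
      · exact (hmm p.2 p.1).2 (by simpa using hpL)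
      · refine ⟨hc.1.1, hc.1.2.1, hc.1.2.2.1, hc.1.2.2.2.1, hc.1.2.2.2.2.2, ?_⟩
        intro h
        exact hc.2 (by linarith [h])
    · rintro ⟨rc, ⟨hrcM, hc⟩, rfl⟩
      have hidx0 : 0 ≤ rc.1 * g + rc.2 := add_nonneg (mul_nonneg hc.1 (by omega)) hc.2.2.1
      refine ⟨(rc.2, rc.1), ⟨⟨?_, ?_⟩, ?_⟩, by ring⟩
      · have := (hmm rc.1 rc.2).1 (by simpa using hrcM)
        simpa using this
      · exact ⟨hc.2.2.1, hc.2.2.2.1, hc.1, hc.2.1⟩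
      · refine ⟨⟨hc.1, hc.2.1, hc.2.2.1, hc.2.2.2.1, by simpa using hidx0, by simpa using hc.2.2.2.2.1⟩, ?_⟩
        intro h
        exact hc.2.2.2.2.2 (by linarith [h])
  have hperm : rawA.Perm rawB := (List.perm_ext_iff_of_nodup hndA hndB).2 hmemx
  have hpw : (PySem.List.sorted rawA (fun x => x) false).Pairwise (· < ·) := by
    have h1 := PySem.List.sorted_pairwise rawA (fun x : Int => x)
    have h2 : (PySem.List.sorted rawA (fun x => x) false).Nodup :=
      ((PySem.List.sorted_perm rawA _ _).nodup_iff).2 hndA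
    exact (h1.and h2).imp (fun hab => lt_of_le_of_ne hab.1 hab.2)
  exact PySem.List.sorted_eq_of_perm_of_pairwise_lt _ _ _
    ((PySem.List.sorted_perm rawA _ _).trans hperm) hpw

-- proof-only abbreviations: the two neighbour pipelines at a generic (g, row, col)
def bSideRaw (base n port g row col : Int) : List Int :=
  PySem.List.sorted
    ((([(row, col - 1), (row, col + 1)] ++
        ([(-1 : Int), 1].flatMap (fun dr =>
          [PySem.Int.mod row 2 - 1, PySem.Int.mod row 2].map (fun dc => (row + dr, col + dc))))).filter
       (fun rc =>
        decide (0 ≤ rc.1 ∧ rc.1 < g ∧ 0 ≤ rc.2 ∧ rc.2 < g ∧ rc.1 * g + rc.2 < n ∧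
          base + rc.1 * g + rc.2 ≠ port))).map (fun rc => base + rc.1 * g + rc.2))
    (fun x => x) false

def aSideRaw (base n port g row col : Int) : List Int :=
  PySem.List.sorted ((hexNeighborsOddR col row g).foldl (fun acc p =>
    match rcToPort base p.2 p.1 g n with
    | some nport => if nport ≠ port then acc ++ [nport] else acc
    | none => acc) []) (fun x => x) false

lemma nbr_parity (base n port g row col : Int) (hg : 1 ≤ g) :
    bSideRaw base n port g row col = aSideRaw base n port g row col := by
  unfold bSideRaw aSideRaw hexNeighborsOddR
  rcases PySem.Int.mod_two_eq row with hpar | hpar <;> rw [hpar]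
  · have hcand : ([(row, col - 1), (row, col + 1)] ++
        ([(-1 : Int), 1].flatMap (fun dr => [(0:Int) - 1, 0].map (fun dc => (row + dr, col + dc))))) =
        [(row, col - 1), (row, col + 1), (row - 1, col - 1), (row - 1, col),
         (row + 1, col - 1), (row + 1, col)] := by
      simp [List.flatMap, Prod.mk.injEq]
      omega
    rw [hcand, if_pos rfl]
    exact nbr_core base n port g hg _ _ (by simp [Prod.ext_iff]; omega) (by simp [Prod.ext_iff]; omega)
      (by intro r c; simp [Prod.ext_iff]; tauto)
  · have hcand : ([(row, col - 1), (row, col + 1)] ++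
        ([(-1 : Int), 1].flatMap (fun dr => [(1:Int) - 1, 1].map (fun dc => (row + dr, col + dc))))) =
        [(row, col - 1), (row, col + 1), (row - 1, col), (row - 1, col + 1),
         (row + 1, col), (row + 1, col + 1)] := by
      simp [List.flatMap, Prod.mk.injEq]
      omega
    rw [hcand, if_neg (by omega : ¬ ((1:Int) = 0))]
    exact nbr_core base n port g hg _ _ (by simp [Prod.ext_iff]; omega) (by simp [Prod.ext_iff]; omega)
      (by intro r c; simp [Prod.ext_iff]; tauto)

lemma nbrPortsAlt_eq (base n port : Int) (hn : 0 ≤ n) :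
    nbrPortsAlt base n port = neighborsForPort base n port := by
  have hg : 1 ≤ autoGridSize n := autoGridSize_pos n
  have hB : nbrPortsAlt base n port = bSideRaw base n port (gridAlt n)
      (PySem.Int.floordiv (port - base) (gridAlt n)) (PySem.Int.mod (port - base) (gridAlt n)) := rfl
  have hA : neighborsForPort base n port = aSideRaw base n port (autoGridSize n)
      (PySem.Int.floordiv (port - base) (autoGridSize n)) (PySem.Int.mod (port - base) (autoGridSize n)) := rfl
  rw [hB, hA, gridAlt_eq n hn]
  exact nbr_parity base n port (autoGridSize n) _ _ hg

-- ---- BFS equivalence machinery ----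

-- every port a node can reach (its stated neighbours live in [base, base+n))
def portsP (base_port number_of_nodes : Int) (x : Int) : Prop :=
  x = centerPort base_port number_of_nodes ∨ (base_port ≤ x ∧ x < base_port + number_of_nodes)

-- A's per-node inner loop, as standalone folds
def afold (st : PySem.Set Int × List Int) (L : List Int) : PySem.Set Int × List Int :=
  L.foldl (fun s nb => if nb ∈ s.1 then s else (PySem.Set.add s.1 nb, s.2 ++ [nb])) st

def astep (base_port number_of_nodes : Int) (st : PySem.Set Int × List Int) (F : List Int) :
    PySem.Set Int × List Int :=
  F.foldl (fun s port => afold s (neighborsForPort base_port number_of_nodes port)) st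

lemma rcToPort_range {base_port row col grid number_of_nodes v : Int}
    (h : rcToPort base_port row col grid number_of_nodes = some v) :
    base_port ≤ v ∧ v < base_port + number_of_nodes := by
  unfold rcToPort at h
  split_ifs at h with h1
  all_goals simp_all
  constructor <;> linarith [h.1, h.2]

lemma mem_neighborsForPort {base_port number_of_nodes port x : Int}
    (h : x ∈ neighborsForPort base_port number_of_nodes port) :
    base_port ≤ x ∧ x < base_port + number_of_nodes := by
  unfold neighborsForPort at h
  rw [PySem.List.mem_sorted] at h
  have key : ∀ (L : List (Int × Int)) (acc : List Int),
      x ∈ L.foldl (fun acc p =>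
        match rcToPort base_port p.2 p.1 (autoGridSize number_of_nodes) number_of_nodes with
        | some nport => if nport ≠ port then acc ++ [nport] else acc
        | none => acc) acc →
      x ∈ acc ∨ ∃ row col, rcToPort base_port row col (autoGridSize number_of_nodes) number_of_nodes = some x := by
    intro L
    induction L with
    | nil => intro acc h; exact Or.inl h
    | cons p L ih =>
      intro acc h
      simp only [List.foldl_cons] at h
      rcases ih _ h with h' | h'
      · cases hr : rcToPort base_port p.2 p.1 (autoGridSize number_of_nodes) number_of_nodes with
        | none => rw [hr] at h'; exact Or.inl h'
        | some nport =>
          rw [hr] at h'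
          by_cases hne : nport ≠ port
          · simp only [if_pos hne, List.mem_append, List.mem_singleton] at h'
            rcases h' with h' | h'
            · exact Or.inl h'
            · exact Or.inr ⟨p.2, p.1, h' ▸ hr⟩
          · simp only [if_neg hne] at h'; exact Or.inl h'
      · exact Or.inr h'
  rcases key _ [] h with h' | ⟨row, col, hr⟩
  · simp at h'
  · exact rcToPort_range hr

lemma card_bound (base_port number_of_nodes : Int) (V : List Int) (hnd : V.Nodup)
    (hp : ∀ x ∈ V, portsP base_port number_of_nodes x) :
    V.length ≤ number_of_nodes.toNat + 1 := by
  classical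
  have h1 : V.toFinset.card = V.length := List.toFinset_card_of_nodup hnd
  have sub : V.toFinset ⊆ (centerPort base_port number_of_nodes ::
      PySem.List.pyRange base_port (base_port + number_of_nodes) 1).toFinset := by
    intro x hx
    rw [List.mem_toFinset] at hx ⊢
    rcases hp x hx with h | h
    · exact h ▸ List.mem_cons_self ..
    · exact List.mem_cons_of_mem _ ((PySem.List.mem_pyRange_one).2 ⟨h.1, h.2⟩)
  have h2 := Finset.card_le_card sub
  have h3 := List.toFinset_card_le (centerPort base_port number_of_nodes ::
      PySem.List.pyRange base_port (base_port + number_of_nodes) 1)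
  have h4 : (centerPort base_port number_of_nodes ::
      PySem.List.pyRange base_port (base_port + number_of_nodes) 1).length =
      1 + number_of_nodes.toNat := by
    simp [PySem.List.length_pyRange_one]
    omega
  omega

lemma afold_char (L : List Int) : ∀ (V : PySem.Set Int) (Nxt : List Int), V.Nodup →
    ∃ E, afold (V, Nxt) L = (V ++ E, Nxt ++ E) ∧ E.Nodup ∧
      (∀ x, x ∈ E ↔ (x ∉ V ∧ x ∈ L)) := by
  induction L with
  | nil => exact fun V Nxt _ => ⟨[], by simp [afold], by simp, by simp⟩
  | cons nb L ih =>
    intro V Nxt hnd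
    by_cases hm : nb ∈ V
    · have step : afold (V, Nxt) (nb :: L) = afold (V, Nxt) L := by
        simp [afold, hm]
      obtain ⟨E, he, hnodup, hmem⟩ := ih V Nxt hnd
      refine ⟨E, step ▸ he, hnodup, fun x => ?_⟩
      rw [hmem x]
      constructor
      · rintro ⟨h1, h2⟩; exact ⟨h1, List.mem_cons_of_mem _ h2⟩
      · rintro ⟨h1, h2⟩
        rcases List.mem_cons.1 h2 with rfl | h2
        · exact absurd hm h1
        · exact ⟨h1, h2⟩
    · have step : afold (V, Nxt) (nb :: L) = afold (V ++ [nb], Nxt ++ [nb]) L := by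
        simp [afold, hm]
      have hnd' : (V ++ [nb]).Nodup := by
        rw [List.nodup_append]
        refine ⟨hnd, List.nodup_singleton _, fun a ha b hb h => ?_⟩
        rw [List.mem_singleton.1 hb] at h
        exact hm (h ▸ ha)
      obtain ⟨E, he, hnodup, hmem⟩ := ih (V ++ [nb]) (Nxt ++ [nb]) hnd'
      have hnbE : nb ∉ E := fun hc => ((hmem nb).1 hc).1 (by simp)
      refine ⟨nb :: E, ?_, (List.nodup_cons).2 ⟨hnbE, hnodup⟩, fun x => ?_⟩
      · rw [step, he]; simp
      · constructor
        · intro hx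
          rcases List.mem_cons.1 hx with rfl | hx
          · exact ⟨hm, by simp⟩
          · obtain ⟨h1, h2⟩ := (hmem x).1 hx
            exact ⟨fun hc => h1 (by simp [hc]), List.mem_cons_of_mem _ h2⟩
        · rintro ⟨h1, h2⟩
          rcases List.mem_cons.1 h2 with rfl | h2
          · exact List.mem_cons_self ..
          · by_cases hxnb : x = nb
            · exact hxnb ▸ List.mem_cons_self ..
            · exact List.mem_cons_of_mem _ ((hmem x).2 ⟨by simp [h1, hxnb], h2⟩)

lemma astep_char (base_port number_of_nodes : Int) (F : List Int) :
    ∀ (V : PySem.Set Int) (Nxt : List Int), V.Nodup →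
    ∃ E, astep base_port number_of_nodes (V, Nxt) F = (V ++ E, Nxt ++ E) ∧ E.Nodup ∧
      (∀ x, x ∈ E ↔ (x ∉ V ∧ ∃ c ∈ F, x ∈ neighborsForPort base_port number_of_nodes c)) := by
  induction F with
  | nil => exact fun V Nxt _ => ⟨[], by simp [astep], by simp, by simp⟩
  | cons c F ih =>
    intro V Nxt hnd
    obtain ⟨E1, he1, hnd1, hmem1⟩ := afold_char (neighborsForPort base_port number_of_nodes c) V Nxt hnd
    have step : astep base_port number_of_nodes (V, Nxt) (c :: F) =
        astep base_port number_of_nodes (V ++ E1, Nxt ++ E1) F := by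
      simp only [astep, List.foldl_cons]
      rw [show afold (V, Nxt) (neighborsForPort base_port number_of_nodes c) = (V ++ E1, Nxt ++ E1) from he1]
    have hndV1 : (V ++ E1).Nodup := by
      rw [List.nodup_append]
      exact ⟨hnd, hnd1, fun a ha b hb h => ((hmem1 b).1 hb).1 (h ▸ ha)⟩
    obtain ⟨E2, he2, hnd2, hmem2⟩ := ih (V ++ E1) (Nxt ++ E1) hndV1
    refine ⟨E1 ++ E2, by rw [step, he2]; simp, ?_, fun x => ?_⟩
    · rw [List.nodup_append]
      exact ⟨hnd1, hnd2, fun a ha b hb h => ((hmem2 b).1 hb).1 (by simp [h ▸ ha])⟩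
    · constructor
      · intro hx
        rcases List.mem_append.1 hx with hx | hx
        · obtain ⟨h1, h2⟩ := (hmem1 x).1 hx
          exact ⟨h1, c, List.mem_cons_self .., h2⟩
        · obtain ⟨h1, ⟨c', hc', h2⟩⟩ := (hmem2 x).1 hx
          exact ⟨fun hc => h1 (by simp [hc]), c', List.mem_cons_of_mem _ hc', h2⟩
      · rintro ⟨h1, c', hc', h2⟩
        by_cases hx1 : x ∈ E1
        · exact List.mem_append.2 (Or.inl hx1)
        · rcases List.mem_cons.1 hc' with rfl | hc'
          · exact absurd ((hmem1 x).2 ⟨h1, h2⟩) hx1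
          · exact List.mem_append.2 (Or.inr ((hmem2 x).2 ⟨by simp [h1, hx1], c', hc', h2⟩))

lemma fireLoopB_nil (base_port number_of_nodes : Int) (f : Nat) (D : PySem.Dict Int Int) :
    fireLoopB base_port number_of_nodes f D [] = D := by
  cases f <;> rfl

-- B's inner loop over the neighbour list of `cur`
lemma bfold_char (base_port number_of_nodes : Int) (L : List Int) :
    ∀ (D : PySem.Dict Int Int) (Q : List Int) (cur k : Int), D.keys.Nodup → D.get? cur = some k →
    ∃ D' E,
      L.foldl (fun (s : PySem.Dict Int Int × List Int) nb =>
          if s.1.contains nb then s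
          else (s.1.insert nb (s.1.getD cur 0 + 1), s.2 ++ [nb])) (D, Q) = (D', Q ++ E) ∧
      D'.keys.Nodup ∧ E.Nodup ∧
      (∀ x v, D'.get? x = some v ↔ (D.get? x = some v ∨ (x ∈ E ∧ v = k + 1))) ∧
      (∀ x, x ∈ E ↔ (D.get? x = none ∧ x ∈ L)) := by
  induction L with
  | nil =>
    intro D Q cur k hnd hcur
    exact ⟨D, [], by simp, hnd, by simp, fun x v => by simp, fun x => by simp⟩
  | cons nb L ih =>
    intro D Q cur k hnd hcur
    by_cases hc : D.contains nb = true
    · obtain ⟨D', E, heq, hnd', hndE, hchar, hmem⟩ := ih D Q cur k hnd hcur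
      have hnbsome : D.get? nb ≠ none := by
        rw [PySem.Dict.contains_eq_isSome_get?] at hc
        exact fun h => by simp [h] at hc
      refine ⟨D', E, by simpa [hc] using heq, hnd', hndE, hchar, fun x => ?_⟩
      rw [hmem x]
      constructor
      · rintro ⟨h1, h2⟩; exact ⟨h1, List.mem_cons_of_mem _ h2⟩
      · rintro ⟨h1, h2⟩
        rcases List.mem_cons.1 h2 with rfl | h2
        · exact absurd h1 hnbsome
        · exact ⟨h1, h2⟩
    · have hnbnone : D.get? nb = none := by
        rw [PySem.Dict.contains_eq_isSome_get?] at hc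
        cases h : D.get? nb with
        | none => rfl
        | some v => rw [h] at hc; simp at hc
      have hne : cur ≠ nb := fun h => by rw [← h, hcur] at hnbnone; cases hnbnone
      have hgetD : D.getD cur 0 = k := by
        rw [PySem.Dict.getD_eq_get?_getD, hcur]; rfl
      have hnd1 : (D.insert nb (k + 1)).keys.Nodup := PySem.Dict.nodup_keys_insert _ _ _ hnd
      have hcur1 : (D.insert nb (k + 1)).get? cur = some k := by
        rw [PySem.Dict.get?_insert_of_ne _ _ hne]; exact hcur
      obtain ⟨D', E, heq, hnd', hndE, hchar, hmem⟩ := ih (D.insert nb (k + 1)) (Q ++ [nb]) cur k hnd1 hcur1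
      have hD1get : ∀ x v, (D.insert nb (k + 1)).get? x = some v ↔
          (D.get? x = some v ∨ (x = nb ∧ v = k + 1)) := by
        intro x v
        rw [PySem.Dict.get?_insert]
        by_cases hx : x = nb
        · simp [hx, hnbnone, eq_comm]
        · simp [hx]
      have hnbE : nb ∉ E := fun hx => by
        have := ((hmem nb).1 hx).1
        rw [PySem.Dict.get?_insert_self] at this
        cases this
      refine ⟨D', nb :: E, ?_, hnd', (List.nodup_cons).2 ⟨hnbE, hndE⟩, fun x v => ?_, fun x => ?_⟩
      · simp only [List.foldl_cons, if_neg hc, hgetD] at *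
        rw [heq]
        simp
      · rw [hchar x v]
        constructor
        · rintro (h | h)
          · rcases (hD1get x v).1 h with h | ⟨rfl, rfl⟩
            · exact Or.inl h
            · exact Or.inr ⟨List.mem_cons_self .., rfl⟩
          · exact Or.inr ⟨List.mem_cons_of_mem _ h.1, h.2⟩
        · rintro (h | ⟨hx, rfl⟩)
          · exact Or.inl ((hD1get x v).2 (Or.inl h))
          · rcases List.mem_cons.1 hx with rfl | hx
            · exact Or.inl ((hD1get x (k + 1)).2 (Or.inr ⟨rfl, rfl⟩))
            · exact Or.inr ⟨hx, rfl⟩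
      · constructor
        · intro hx
          rcases List.mem_cons.1 hx with rfl | hx
          · exact ⟨hnbnone, List.mem_cons_self ..⟩
          · obtain ⟨h1, h2⟩ := (hmem x).1 hx
            by_cases hxnb : x = nb
            · subst hxnb; rw [PySem.Dict.get?_insert_self] at h1; cases h1
            · rw [PySem.Dict.get?_insert_of_ne _ _ hxnb] at h1
              exact ⟨h1, List.mem_cons_of_mem _ h2⟩
        · rintro ⟨h1, h2⟩
          by_cases hxnb : x = nb
          · exact hxnb ▸ List.mem_cons_self ..
          · rcases List.mem_cons.1 h2 with rfl | h2
            · exact absurd rfl hxnb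
            · refine List.mem_cons_of_mem _ ((hmem x).2 ⟨?_, h2⟩)
              rw [PySem.Dict.get?_insert_of_ne _ _ hxnb]
              exact h1

lemma fireLoopB_layer (base_port number_of_nodes : Int) (hn : 0 ≤ number_of_nodes) (F : List Int) :
    ∀ (fB : Nat) (D : PySem.Dict Int Int) (P : List Int) (k : Int),
    D.keys.Nodup → (∀ x ∈ F, D.get? x = some k) →
    ∃ D' E,
      fireLoopB base_port number_of_nodes (fB + F.length) D (F ++ P) =
        fireLoopB base_port number_of_nodes fB D' (P ++ E) ∧
      D'.keys.Nodup ∧ E.Nodup ∧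
      (∀ x v, D'.get? x = some v ↔ (D.get? x = some v ∨ (x ∈ E ∧ v = k + 1))) ∧
      (∀ x, x ∈ E ↔ (D.get? x = none ∧ ∃ c ∈ F, x ∈ neighborsForPort base_port number_of_nodes c)) := by
  induction F with
  | nil =>
    intro fB D P k hnd _
    exact ⟨D, [], by simp, hnd, by simp, fun x v => by simp, fun x => by simp⟩
  | cons c F ih =>
    intro fB D P k hnd hF
    obtain ⟨D1, E1, heq1, hnd1, hndE1, hchar1, hmem1⟩ :=
      bfold_char base_port number_of_nodes (neighborsForPort base_port number_of_nodes c)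
        D (F ++ P) c k hnd (hF c (List.mem_cons_self ..))
    have hD1none : ∀ x, D1.get? x = none ↔ (D.get? x = none ∧ x ∉ E1) := by
      intro x
      constructor
      · intro h
        refine ⟨?_, fun hx => ?_⟩
        · cases hD : D.get? x with
          | none => rfl
          | some v =>
            have := (hchar1 x v).2 (Or.inl hD)
            rw [h] at this; cases this
        · have := (hchar1 x (k + 1)).2 (Or.inr ⟨hx, rfl⟩)
          rw [h] at this; cases this
      · rintro ⟨h1, h2⟩
        cases hD1 : D1.get? x with
        | none => rfl
        | some v =>
          rcases (hchar1 x v).1 hD1 with h | ⟨hx, _⟩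
          · rw [h1] at h; cases h
          · exact absurd hx h2
    have step : fireLoopB base_port number_of_nodes (fB + (c :: F).length) D ((c :: F) ++ P) =
        fireLoopB base_port number_of_nodes (fB + F.length) D1 (F ++ (P ++ E1)) := by
      have hlen : fB + (c :: F).length = (fB + F.length) + 1 := by simp; omega
      rw [hlen]
      show fireLoopB base_port number_of_nodes ((fB + F.length) + 1) D (c :: (F ++ P)) = _
      simp only [fireLoopB]
      rw [nbrPortsAlt_eq base_port number_of_nodes c hn]
      rw [heq1]
      simp [List.append_assoc]
    have hF1 : ∀ x ∈ F, D1.get? x = some k := fun x hx =>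
      (hchar1 x k).2 (Or.inl (hF x (List.mem_cons_of_mem _ hx)))
    obtain ⟨D', E2, heq2, hnd', hndE2, hchar2, hmem2⟩ := ih (fB) D1 (P ++ E1) k hnd1 hF1
    have hE2E1 : ∀ x ∈ E2, x ∉ E1 := fun x hx =>
      (((hD1none x).1 ((hmem2 x).1 hx).1)).2
    refine ⟨D', E1 ++ E2, ?_, hnd', ?_, fun x v => ?_, fun x => ?_⟩
    · rw [step, heq2]
      simp [List.append_assoc]
    · rw [List.nodup_append]
      exact ⟨hndE1, hndE2, fun a ha b hb h => hE2E1 b hb (h ▸ ha)⟩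
    · rw [hchar2 x v]
      constructor
      · rintro (h | h)
        · rcases (hchar1 x v).1 h with h | ⟨hx, rfl⟩
          · exact Or.inl h
          · exact Or.inr ⟨List.mem_append.2 (Or.inl hx), rfl⟩
        · exact Or.inr ⟨List.mem_append.2 (Or.inr h.1), h.2⟩
      · rintro (h | ⟨hx, rfl⟩)
        · exact Or.inl ((hchar1 x v).2 (Or.inl h))
        · rcases List.mem_append.1 hx with hx | hx
          · exact Or.inl ((hchar1 x (k + 1)).2 (Or.inr ⟨hx, rfl⟩))
          · exact Or.inr ⟨hx, rfl⟩
    · constructor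
      · intro hx
        rcases List.mem_append.1 hx with hx | hx
        · obtain ⟨h1, h2⟩ := (hmem1 x).1 hx
          exact ⟨h1, c, List.mem_cons_self .., h2⟩
        · obtain ⟨h1, c', hc', h2⟩ := (hmem2 x).1 hx
          obtain ⟨h1', _⟩ := (hD1none x).1 h1
          exact ⟨h1', c', List.mem_cons_of_mem _ hc', h2⟩
      · rintro ⟨h1, c', hc', h2⟩
        by_cases hx1 : x ∈ E1
        · exact List.mem_append.2 (Or.inl hx1)
        · rcases List.mem_cons.1 hc' with rfl | hc'
          · exact absurd ((hmem1 x).2 ⟨h1, h2⟩) hx1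
          · refine List.mem_append.2 (Or.inr ((hmem2 x).2 ⟨?_, c', hc', h2⟩))
            exact (hD1none x).2 ⟨h1, hx1⟩

lemma fireLoopA_nilF (base_port number_of_nodes : Int) (f : Nat) (V : PySem.Set Int) :
    fireLoopA base_port number_of_nodes f V [] = [] := by
  cases f <;> simp [fireLoopA]

lemma sorted_props (F : List Int) (h : F.Nodup) :
    (PySem.List.sorted F (fun x => x) false).Nodup ∧
    (PySem.List.sorted F (fun x => x) false).Pairwise (· < ·) := by
  have h2 : (PySem.List.sorted F (fun x => x) false).Nodup :=
    ((PySem.List.sorted_perm F _ _).nodup_iff).2 h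
  refine ⟨h2, ?_⟩
  have h1 := PySem.List.sorted_pairwise F (fun x => x)
  exact (h1.and h2).imp (fun hab => lt_of_le_of_ne hab.1 hab.2)

-- the main simulation: what B's traversal records, in terms of A's layers
lemma main_sim (base_port number_of_nodes : Int) (hn : 0 ≤ number_of_nodes) :
    ∀ (fA fB : Nat) (V : PySem.Set Int) (D : PySem.Dict Int Int) (F Q : List Int) (k : Int),
    V.Nodup → D.keys.Nodup →
    (∀ x, x ∈ V ↔ D.contains x = true) →
    (∀ x, x ∈ F ↔ x ∈ Q) → F.Nodup → Q.Nodup →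
    (∀ x ∈ F, D.get? x = some k) →
    (∀ x ∈ V, portsP base_port number_of_nodes x) → (∀ x ∈ F, x ∈ V) →
    (number_of_nodes.toNat + 1 - V.length) + 1 ≤ fA →
    (number_of_nodes.toNat + 1 - V.length) + Q.length ≤ fB →
    (fireLoopB base_port number_of_nodes fB D Q).keys.Nodup ∧
    (∀ x v, (fireLoopB base_port number_of_nodes fB D Q).get? x = some v ↔
      (D.get? x = some v ∨ ∃ j : Nat, 1 ≤ j ∧ j < (fireLoopA base_port number_of_nodes fA V F).length ∧
        v = k + j ∧ x ∈ (fireLoopA base_port number_of_nodes fA V F).getD j [])) ∧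
    (∀ L ∈ fireLoopA base_port number_of_nodes fA V F, L ≠ [] ∧ L.Nodup ∧ L.Pairwise (· < ·)) ∧
    (F = [] → fireLoopA base_port number_of_nodes fA V F = []) ∧
    (F ≠ [] → (fireLoopA base_port number_of_nodes fA V F).getD 0 [] =
        PySem.List.sorted F (fun x => x) false ∧ fireLoopA base_port number_of_nodes fA V F ≠ []) := by
  intro fA
  induction fA with
  | zero =>
    intro fB V D F Q k _ _ _ _ _ _ _ _ _ hfA _
    omega
  | succ fA ih =>
    intro fB V D F Q k hndV hndD hrel hFQ hndF hndQ hFk hVp hFV hfA hfB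
    by_cases hF : F = []
    · subst hF
      have hQ : Q = [] := List.eq_nil_iff_forall_not_mem.2 (fun x hx => by simpa using (hFQ x).2 hx)
      subst hQ
      rw [fireLoopB_nil]
      have hLa : fireLoopA base_port number_of_nodes (fA + 1) V [] = [] :=
        fireLoopA_nilF _ _ _ _
      rw [hLa]
      exact ⟨hndD, fun x v => by simp, by simp, fun _ => rfl, fun h => absurd rfl h⟩
    · obtain ⟨EA, haeq, hndEA, hmemEA⟩ := astep_char base_port number_of_nodes F V [] hndV
      rw [List.nil_append] at haeq
      have hLa : fireLoopA base_port number_of_nodes (fA + 1) V F =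
          PySem.List.sorted F (fun x => x) false ::
          fireLoopA base_port number_of_nodes fA (V ++ EA)
            (PySem.List.sorted (PySem.Set.ofList EA) (fun x => x) false) := by
        have haeq' := haeq
        simp only [astep, afold] at haeq'
        simp only [fireLoopA, if_neg hF]
        rw [haeq']
      have hQlen : Q.length ≤ fB := by omega
      obtain ⟨D1, EB, hbeq, hndD1, hndEB, hchar1, hmemEB⟩ :=
        fireLoopB_layer base_port number_of_nodes hn Q (fB - Q.length) D [] k hndD
          (fun x hx => hFk x ((hFQ x).2 hx))
      rw [List.append_nil, List.nil_append, Nat.sub_add_cancel hQlen] at hbeq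
      have hnone : ∀ x, D.get? x = none ↔ x ∉ V := by
        intro x
        rw [hrel x, PySem.Dict.contains_eq_isSome_get?]
        cases h : D.get? x <;> simp
      have hmemEq : ∀ x, x ∈ EA ↔ x ∈ EB := by
        intro x
        rw [hmemEA x, hmemEB x]
        constructor
        · rintro ⟨h1, c, hc, h2⟩; exact ⟨(hnone x).2 h1, c, (hFQ c).1 hc, h2⟩
        · rintro ⟨h1, c, hc, h2⟩; exact ⟨(hnone x).1 h1, c, (hFQ c).2 hc, h2⟩
      have hperm : EA.Perm EB := (List.perm_ext_iff_of_nodup hndEA hndEB).2 hmemEq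
      have hlenE : EA.length = EB.length := hperm.length_eq
      have hndV' : (V ++ EA).Nodup := by
        rw [List.nodup_append]
        exact ⟨hndV, hndEA, fun a ha b hb h => ((hmemEA b).1 hb).1 (h ▸ ha)⟩
      have hVp' : ∀ x ∈ V ++ EA, portsP base_port number_of_nodes x := by
        intro x hx
        rcases List.mem_append.1 hx with hx | hx
        · exact hVp x hx
        · obtain ⟨_, c, _, h2⟩ := (hmemEA x).1 hx
          exact Or.inr (mem_neighborsForPort h2)
      have hcardV' := card_bound base_port number_of_nodes (V ++ EA) hndV' hVp'
      rw [List.length_append] at hcardV'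
      have hsF := sorted_props F hndF
      have hsFnil : PySem.List.sorted F (fun x => x) false ≠ [] := by
        rw [Ne, PySem.List.sorted_eq_nil_iff]; exact hF
      by_cases hEA : EA = []
      · have hEB : EB = [] := ((hEA ▸ hperm).symm).eq_nil
        have hF'nil : PySem.List.sorted (PySem.Set.ofList EA) (fun x => x) false = [] := by
          rw [hEA]; rfl
        rw [hLa, hF'nil, fireLoopA_nilF]
        rw [hbeq, hEB, fireLoopB_nil]
        refine ⟨hndD1, fun x v => ?_, ?_, fun h => absurd h hF, fun _ => ⟨rfl, by simp⟩⟩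
        · rw [hchar1 x v, hEB]
          simp
        · intro L hL
          rcases List.mem_singleton.1 hL with rfl
          exact ⟨hsFnil, hsF.1, hsF.2⟩
      · have hEB : EB ≠ [] := fun h => hEA ((h ▸ hperm).eq_nil)
        have hmemF' : ∀ x, x ∈ PySem.List.sorted (PySem.Set.ofList EA) (fun x => x) false ↔ x ∈ EB := by
          intro x
          rw [PySem.List.mem_sorted, PySem.Set.mem_ofList]
          exact hmemEq x
        have hcontains1 : ∀ x, D1.contains x = true ↔ (D.contains x = true ∨ x ∈ EB) := by
          intro x
          rw [PySem.Dict.contains_eq_isSome_get?, PySem.Dict.contains_eq_isSome_get?]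
          constructor
          · intro h
            cases h1 : D1.get? x with
            | none => rw [h1] at h; simp at h
            | some v =>
              rcases (hchar1 x v).1 h1 with h2 | ⟨h2, _⟩
              · exact Or.inl (by rw [h2]; rfl)
              · exact Or.inr h2
          · rintro (h | h)
            · cases h1 : D.get? x with
              | none => rw [h1] at h; simp at h
              | some v => rw [(hchar1 x v).2 (Or.inl h1)]; rfl
            · rw [(hchar1 x (k + 1)).2 (Or.inr ⟨h, rfl⟩)]; rfl
        have hrel' : ∀ x, x ∈ V ++ EA ↔ D1.contains x = true := by
          intro x
          rw [hcontains1 x, List.mem_append]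
          constructor
          · rintro (h | h)
            · exact Or.inl ((hrel x).1 h)
            · exact Or.inr ((hmemEq x).1 h)
          · rintro (h | h)
            · exact Or.inl ((hrel x).2 h)
            · exact Or.inr ((hmemEq x).2 h)
        have hndF' : (PySem.List.sorted (PySem.Set.ofList EA) (fun x => x) false).Nodup :=
          ((PySem.List.sorted_perm _ _ _).nodup_iff).2 (PySem.Set.nodup_ofList EA)
        have hFk' : ∀ x ∈ PySem.List.sorted (PySem.Set.ofList EA) (fun x => x) false,
            D1.get? x = some (k + 1) := fun x hx =>
          (hchar1 x (k + 1)).2 (Or.inr ⟨(hmemF' x).1 hx, rfl⟩)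
        have hFV' : ∀ x ∈ PySem.List.sorted (PySem.Set.ofList EA) (fun x => x) false, x ∈ V ++ EA :=
          fun x hx => List.mem_append.2 (Or.inr ((hmemEq x).2 ((hmemF' x).1 hx)))
        have hEAlen : 1 ≤ EA.length := by
          cases EA with
          | nil => exact absurd rfl hEA
          | cons a l => simp
        have hfA' : (number_of_nodes.toNat + 1 - (V ++ EA).length) + 1 ≤ fA := by
          rw [List.length_append]
          omega
        have hfB' : (number_of_nodes.toNat + 1 - (V ++ EA).length) + EB.length ≤ fB - Q.length := by
          rw [List.length_append]
          omega
        obtain ⟨C1, C2, C3, _, C5⟩ := ih (fB - Q.length) (V ++ EA) D1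
          (PySem.List.sorted (PySem.Set.ofList EA) (fun x => x) false) EB (k + 1)
          hndV' hndD1 hrel' hmemF' hndF' hndEB hFk' hVp' hFV' hfA' hfB'
        have hF'nil : PySem.List.sorted (PySem.Set.ofList EA) (fun x => x) false ≠ [] := by
          rw [Ne, PySem.List.sorted_eq_nil_iff]
          intro h
          cases EA with
          | nil => exact hEA rfl
          | cons a l =>
            have ha : a ∈ PySem.Set.ofList (a :: l) := (PySem.Set.mem_ofList _ _).2 (List.mem_cons_self ..)
            rw [h] at ha
            simp at ha
        obtain ⟨hL0', hLs'nil⟩ := C5 hF'nil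
        set Ls' := fireLoopA base_port number_of_nodes fA (V ++ EA)
          (PySem.List.sorted (PySem.Set.ofList EA) (fun x => x) false) with hLs'
        have hLs'len : 1 ≤ Ls'.length := by
          have := List.length_pos_of_ne_nil hLs'nil
          omega
        have hmemL0' : ∀ x, x ∈ Ls'.getD 0 [] ↔ x ∈ EB := by
          intro x
          rw [hL0', PySem.List.mem_sorted]
          exact hmemF' x
        rw [hLa, hbeq]
        refine ⟨C1, fun x v => ?_, ?_, fun h => absurd h hF, fun _ => ⟨rfl, by simp⟩⟩
        · rw [C2 x v]
          constructor
          · rintro (h | h)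
            · rcases (hchar1 x v).1 h with h1 | ⟨h1, rfl⟩
              · exact Or.inl h1
              · refine Or.inr ⟨1, le_refl 1, ?_, by ring, ?_⟩
                · simp only [List.length_cons]; omega
                · simpa using (hmemL0' x).2 h1
            · obtain ⟨j, hj1, hj2, rfl, hjmem⟩ := h
              refine Or.inr ⟨j + 1, by omega, ?_, by push_cast; ring, ?_⟩
              · simp only [List.length_cons]; omega
              · simpa using hjmem
          · rintro (h | h)
            · exact Or.inl ((hchar1 x v).2 (Or.inl h))
            · obtain ⟨j, hj1, hj2, rfl, hjmem⟩ := h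
              simp only [List.length_cons] at hj2
              obtain ⟨j', rfl⟩ : ∃ j', j = j' + 1 := ⟨j - 1, by omega⟩
              simp only [List.getD_cons_succ] at hjmem
              cases j' with
              | zero =>
                exact Or.inl ((hchar1 x (k + 1)).2 (Or.inr ⟨(hmemL0' x).1 hjmem, by norm_num⟩))
              | succ j'' =>
                exact Or.inr ⟨j'' + 1, by omega, by omega, by push_cast; ring, hjmem⟩
        · intro L hL
          rcases List.mem_cons.1 hL with rfl | hL
          · exact ⟨hsFnil, hsF.1, hsF.2⟩
          · exact C3 L hL

-- assembling the final equality from main_sim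
lemma final_eq (base_port number_of_nodes : Int) (hn : 0 ≤ number_of_nodes) :
    fire_spread_batches_py base_port number_of_nodes =
    fire_spread_batches_py_alt base_port number_of_nodes := by
  set ign := centerPort base_port number_of_nodes with hign
  have hignB : ignitionAlt base_port number_of_nodes = ign := ignitionAlt_eq _ _ hn
  have hV0 : PySem.Set.add PySem.Set.empty ign = [ign] :=
    PySem.Set.add_of_not_mem (List.not_mem_nil)
  set D0 := PySem.Dict.insert PySem.Dict.empty ign (0 : Int) with hD0def
  have hD0 : ∀ x v, D0.get? x = some v ↔ (x = ign ∧ v = 0) := by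
    intro x v
    rw [hD0def, PySem.Dict.get?_insert]
    by_cases hx : x = ign
    · simp [hx, eq_comm]
    · simp [hx, PySem.Dict.get?_empty]
  have hndD0 : D0.keys.Nodup :=
    PySem.Dict.nodup_keys_insert _ _ _ PySem.Dict.nodup_keys_empty
  have hrel0 : ∀ x, x ∈ [ign] ↔ D0.contains x = true := by
    intro x
    rw [PySem.Dict.contains_eq_isSome_get?]
    constructor
    · intro hx
      rw [(hD0 x 0).2 ⟨List.mem_singleton.1 hx, rfl⟩]; rfl
    · intro hx
      cases h : D0.get? x with
      | none => rw [h] at hx; simp at hx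
      | some v => exact List.mem_singleton.2 ((hD0 x v).1 h).1
  obtain ⟨hndFin, hchar, hstruct, _, hhead⟩ :=
    main_sim base_port number_of_nodes hn (number_of_nodes.toNat + 2) (number_of_nodes.toNat + 2)
      [ign] D0 [ign] [ign] 0
      (List.nodup_singleton _) hndD0 hrel0 (fun x => Iff.rfl)
      (List.nodup_singleton _) (List.nodup_singleton _)
      (fun x hx => by rw [(hD0 x 0).2 ⟨List.mem_singleton.1 hx, rfl⟩])
      (fun x hx => Or.inl (List.mem_singleton.1 hx))
      (fun x hx => hx)
      (by simp) (by simp)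
  obtain ⟨hL0, hLsnil⟩ := hhead (by simp)
  set Ls := fireLoopA base_port number_of_nodes (number_of_nodes.toNat + 2) [ign] [ign] with hLsdef
  set Dfin := fireLoopB base_port number_of_nodes (number_of_nodes.toNat + 2) D0 [ign] with hDfin
  set m := Ls.length with hm
  have hm1 : 1 ≤ m := by
    have := List.length_pos_of_ne_nil hLsnil
    omega
  have hL0' : Ls.getD 0 [] = [ign] := by rw [hL0]; rfl
  have hgetLs : ∀ x v, Dfin.get? x = some v ↔
      ∃ j : Nat, j < m ∧ v = j ∧ x ∈ Ls.getD j [] := by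
    intro x v
    rw [hchar x v]
    constructor
    · rintro (h | ⟨j, hj1, hj2, hj3, hj4⟩)
      · obtain ⟨rfl, rfl⟩ := (hD0 x v).1 h
        exact ⟨0, by omega, rfl, by rw [hL0']; exact List.mem_singleton.2 rfl⟩
      · exact ⟨j, hj2, by rw [hj3]; ring, hj4⟩
    · rintro ⟨j, hj1, rfl, hj2⟩
      cases j with
      | zero =>
        refine Or.inl ((hD0 x 0).2 ⟨?_, rfl⟩)
        rw [hL0'] at hj2
        exact List.mem_singleton.1 hj2
      | succ j' =>
        exact Or.inr ⟨j' + 1, by omega, hj1, by push_cast; ring, hj2⟩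
  have hlayer : ∀ j : Nat, j < m → Ls.getD j [] ∈ Ls := by
    intro j hj
    rw [List.getD_eq_getElem?_getD, List.getElem?_eq_getElem hj]
    exact List.getElem_mem hj
  have hvalues : ∀ v, v ∈ Dfin.values ↔ ∃ j : Nat, j < m ∧ v = (j : Int) := by
    intro v
    constructor
    · intro hv
      simp only [PySem.Dict.values] at hv
      obtain ⟨p, hp, hp2⟩ := List.mem_map.1 hv
      have hget : Dfin.get? p.1 = some v :=
        PySem.Dict.get?_of_mem_items _ (by rw [← hp2, Prod.mk.eta]; exact hp) hndFin
      obtain ⟨j, hj1, hj2, _⟩ := (hgetLs p.1 v).1 hget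
      exact ⟨j, hj1, hj2⟩
    · rintro ⟨j, hj, rfl⟩
      obtain ⟨hne, _, _⟩ := hstruct _ (hlayer j hj)
      obtain ⟨x, hx⟩ := List.exists_mem_of_ne_nil _ hne
      have hget : Dfin.get? x = some j := (hgetLs x j).2 ⟨j, hj, rfl, hx⟩
      simp only [PySem.Dict.values]
      exact List.mem_map.2 ⟨(x, (j : Int)), PySem.Dict.mem_items_of_get?_eq_some _ hget, rfl⟩
  have hmax : (PySem.List.max? Dfin.values (fun v => v)).getD 0 = (m : Int) - 1 := by
    have h0 : (0 : Int) ∈ Dfin.values := (hvalues 0).2 ⟨0, by omega, rfl⟩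
    cases hmx : PySem.List.max? Dfin.values (fun v => v) with
    | none =>
      rw [PySem.List.max?_eq_none_iff] at hmx
      rw [hmx] at h0
      simp at h0
    | some mx =>
      obtain ⟨j0, hj0, rfl⟩ := (hvalues mx).1 (PySem.List.max?_mem hmx)
      have hub := PySem.List.max?_isMax hmx ((m : Int) - 1)
        ((hvalues _).2 ⟨m - 1, by omega, by omega⟩)
      simp only [Option.getD_some]
      omega
  have hbucket : ∀ j : Nat, j < m →
      PySem.List.sorted ((Dfin.items.filter (fun p => p.2 == (j : Int))).map (·.1)) (fun x => x) false =
      Ls.getD j [] := by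
    intro j hj
    obtain ⟨hne, hnd, hpw⟩ := hstruct _ (hlayer j hj)
    apply PySem.List.sorted_eq_of_perm_of_pairwise_lt _ _ _ _ hpw
    have hndbucket : ((Dfin.items.filter (fun p => p.2 == (j : Int))).map (·.1)).Nodup := by
      have hsub : (Dfin.items.filter (fun p => p.2 == (j : Int))).Sublist Dfin.items :=
        List.filter_sublist
      exact List.Nodup.sublist (hsub.map (·.1)) hndFin
    rw [List.perm_ext_iff_of_nodup hnd hndbucket]
    intro x
    constructor
    · intro hx
      have hget : Dfin.get? x = some j := (hgetLs x j).2 ⟨j, hj, rfl, hx⟩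
      refine List.mem_map.2 ⟨(x, (j : Int)), List.mem_filter.2
        ⟨PySem.Dict.mem_items_of_get?_eq_some _ hget, by simp⟩, rfl⟩
    · intro hx
      obtain ⟨p, hp, hp1⟩ := List.mem_map.1 hx
      obtain ⟨hpitems, hpj⟩ := List.mem_filter.1 hp
      have hpj' : p.2 = (j : Int) := by simpa using hpj
      have hgetp : Dfin.get? p.1 = some p.2 :=
        PySem.Dict.get?_of_mem_items _ (by rw [Prod.mk.eta]; exact hpitems) hndFin
      have hget : Dfin.get? x = some (j : Int) := by
        rw [← hp1, ← hpj']
        exact hgetp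
      obtain ⟨j', hj1', hj2', hj3'⟩ := (hgetLs x (j : Int)).1 hget
      have : j' = j := by exact_mod_cast hj2'.symm
      rwa [← this]
  show fireLoopA base_port number_of_nodes (number_of_nodes.toNat + 2)
      (PySem.Set.add PySem.Set.empty ign) [ign] = _
  rw [hV0, ← hLsdef]
  show Ls = (PySem.List.pyRange 0 ((PySem.List.max?
      (fireLoopB base_port number_of_nodes (number_of_nodes.toNat + 2)
        (PySem.Dict.insert PySem.Dict.empty (ignitionAlt base_port number_of_nodes) 0) [ignitionAlt base_port number_of_nodes]).values
      (fun v => v)).getD 0 + 1) 1).map (fun layer =>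
    PySem.List.sorted (((fireLoopB base_port number_of_nodes (number_of_nodes.toNat + 2)
        (PySem.Dict.insert PySem.Dict.empty (ignitionAlt base_port number_of_nodes) 0) [ignitionAlt base_port number_of_nodes]).items.filter
      (fun p => p.2 == layer)).map (·.1)) (fun x => x) false)
  rw [hignB, ← hD0def, ← hDfin, hmax]
  have hrange : ((m : Int) - 1 + 1) = (m : Int) := by ring
  rw [hrange]
  apply List.ext_getElem
  · rw [List.length_map, PySem.List.length_pyRange_one]
    omega
  · intro j h1 h2
    rw [List.getElem_map, PySem.List.getElem_pyRange_one]
    have hjm : j < m := h1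
    have hzero : ((0 : Int) + (j : Int)) = (j : Int) := by ring
    rw [hzero, hbucket j hjm, List.getD_eq_getElem?_getD, List.getElem?_eq_getElem h1]
    rfl

-- ===== VERDICT (by name: the statement is the Claim_ definition above) =====
theorem fire_spread_batches_py_spec : Claim_equal_fire_spread_batches_py := by
  intro base_port number_of_nodes _ hpre
  exact final_eq base_port number_of_nodes hpre
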